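-- pv_equiv track=rewrite | github.com/121jwang/USACO | Silver/diamond/diamond.py | solve
-- ===== SOURCE A (Python) =====
-- def solve(dList, maxSpread):
--     diamondsIn = []
--     count = 0
--     for x in range(maxSpread + 1):
--         count = count + dList[x]
--     diamondsIn.append([count, 0])
--
--     for x in range(1, len(dList) - maxSpread):
--         count = count + dList[x + maxSpread]
--         count = count - dList[x - 1]
--         diamondsIn.append([count, x])
--
--     return diamondsIn
-- ===== SOURCE B (Python) =====
-- def solve(dList, maxSpread):
--     prefix = [0]
--     for d in dList:
--         prefix.append(prefix[-1] + d)
--     w = maxSpread + 1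
--     return [[prefix[x + w] - prefix[x], x] for x in range(len(dList) - maxSpread)]
-- ===== Notes on version B (the rewrite author's own statement) =====
-- stated objective: alternative
-- what changed: B builds a prefix-sum table once and emits each window as a table difference P[x+w]-P[x] in a single comprehension, replacing A's incrementally updated running accumulator with its separately built first window.
import Mathlib
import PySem

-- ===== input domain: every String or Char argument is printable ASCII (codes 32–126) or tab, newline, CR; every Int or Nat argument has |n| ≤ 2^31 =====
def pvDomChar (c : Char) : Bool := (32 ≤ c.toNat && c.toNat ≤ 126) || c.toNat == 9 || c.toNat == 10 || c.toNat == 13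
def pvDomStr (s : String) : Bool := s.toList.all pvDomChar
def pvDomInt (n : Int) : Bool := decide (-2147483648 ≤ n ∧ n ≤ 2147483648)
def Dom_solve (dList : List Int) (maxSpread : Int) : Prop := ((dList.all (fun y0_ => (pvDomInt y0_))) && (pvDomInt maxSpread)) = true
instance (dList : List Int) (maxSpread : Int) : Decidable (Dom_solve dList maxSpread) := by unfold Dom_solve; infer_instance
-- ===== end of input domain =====

-- B replaces A's running window accumulator by a prefix-sum table queried per window (alternative decomposition, same cost).

-- ===== PORT A =====
def solve (dList : List Int) (maxSpread : Int) : List (List Int) :=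
  let count0 : Int :=
    (PySem.List.pyRange 0 (maxSpread + 1) 1).foldl
      (fun count x => count + PySem.List.pyGetD dList x 0) 0
  let st :=
    (PySem.List.pyRange 1 ((dList.length : Int) - maxSpread) 1).foldl
      (fun (st : List (List Int) × Int) x =>
        let c := st.2 + PySem.List.pyGetD dList (x + maxSpread) 0
                      - PySem.List.pyGetD dList (x - 1) 0
        (st.1 ++ [[c, x]], c))
      ([[count0, 0]], count0)
  st.1

-- ===== PORT B =====
def solve_alt (dList : List Int) (maxSpread : Int) : List (List Int) :=
  let pfx : List Int :=
    dList.foldl (fun acc d => acc ++ [PySem.List.pyGetD acc (-1) 0 + d]) [0]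
  let w := maxSpread + 1
  (PySem.List.pyRange 0 ((dList.length : Int) - maxSpread) 1).map
    (fun x => [PySem.List.pyGetD pfx (x + w) 0 - PySem.List.pyGetD pfx x 0, x])

-- ===== PRECONDITION & SPEC =====
-- Pre_ admits exactly the inputs where Python A returns: maxSpread ≤ -2 and maxSpread ≥ len(dList) raise IndexError.
def Pre_solve (dList : List Int) (maxSpread : Int) : Prop :=
  -1 ≤ maxSpread ∧ maxSpread < (dList.length : Int)
instance (dList : List Int) (maxSpread : Int) : Decidable (Pre_solve dList maxSpread) := by unfold Pre_solve; infer_instance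
def pvWitness_solve : List Int × Int := ([3, 1, 7, 2], 1)

def Spec_solve (dList : List Int) (maxSpread : Int) (out : List (List Int)) : Prop := out = solve_alt dList maxSpread
instance (dList : List Int) (maxSpread : Int) (out : List (List Int)) : Decidable (Spec_solve dList maxSpread out) := by unfold Spec_solve; infer_instance

-- ===== CLAIM (what is proved, stated in full; the proofs are below) =====
def Claim_equal_solve : Prop := ∀ (dList : List Int) (maxSpread : Int), Dom_solve dList maxSpread → Pre_solve dList maxSpread → Spec_solve dList maxSpread (solve dList maxSpread)

-- ===== LEMMAS AND PROOFS =====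

-- prefix sum of the first i elements
def pvPref (l : List Int) (i : Nat) : Int := (l.take i).sum
-- window sum ending at x + m (the running count after iteration x of A's second loop)
def pvC (l : List Int) (m x : Int) : Int := pvPref l (x + m + 1).toNat - pvPref l x.toNat
-- one output row
def pvG (l : List Int) (m x : Int) : List Int := [pvC l m x, x]

lemma pvPref_succ (l : List Int) (i : Nat) (h : i < l.length) :
    pvPref l (i + 1) = pvPref l i + l[i] := by
  simp [pvPref, List.sum_take_succ l i h]

lemma pvPref_succ' (l : List Int) (i : Int) (h0 : 0 ≤ i) (h : i < (l.length : Int)) :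
    pvPref l (i + 1).toNat = pvPref l i.toNat + PySem.List.pyGetD l i 0 := by
  rw [PySem.List.pyGetD_eq_getElem l 0 h0 h]
  rw [show (i + 1).toNat = i.toNat + 1 by omega]
  exact pvPref_succ l i.toNat (by omega)

lemma pfx_fold (l : List Int) : ∀ (acc : List Int) (a : Int),
    l.foldl (fun acc d => acc ++ [PySem.List.pyGetD acc (-1) 0 + d]) (acc ++ [a])
      = acc ++ [a] ++ (List.range l.length).map (fun k => a + (l.take (k + 1)).sum) := by
  induction l with
  | nil => intro acc a; simp
  | cons d t ih =>
    intro acc a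
    have h1 : PySem.List.pyGetD (acc ++ [a]) (-1) 0 = a :=
      PySem.List.pyGetD_neg_one_append_singleton acc a 0
    simp only [List.foldl_cons, h1]
    have := ih (acc ++ [a]) (a + d)
    rw [show (acc ++ [a]) ++ [a + d] = acc ++ [a] ++ [a + d] by simp] at this
    rw [this]
    rw [List.length_cons, List.range_succ_eq_map, List.map_cons, List.map_map]
    simp only [List.take_succ_cons, List.sum_cons]
    simp [Function.comp, add_assoc]

lemma pfx_spec (l : List Int) :
    l.foldl (fun acc d => acc ++ [PySem.List.pyGetD acc (-1) 0 + d]) [0]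
      = (List.range (l.length + 1)).map (fun k => pvPref l k) := by
  have := pfx_fold l [] 0
  simp at this
  rw [this]
  rw [List.range_succ_eq_map]
  simp [pvPref, List.map_map, Function.comp]

lemma pfx_getD (l : List Int) (i : Nat) (h : i ≤ l.length) :
    (l.foldl (fun acc d => acc ++ [PySem.List.pyGetD acc (-1) 0 + d]) [0]).getD i 0
      = pvPref l i := by
  rw [pfx_spec]
  rw [List.getD_eq_getElem?_getD]
  rw [List.getElem?_map]
  have : i < l.length + 1 := by omega
  simp [List.getElem?_range this]

lemma count0_spec (l : List Int) : ∀ (j : Nat), j ≤ l.length →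
    (PySem.List.pyRange 0 (j : Int) 1).foldl (fun c x => c + PySem.List.pyGetD l x 0) 0
      = pvPref l j := by
  intro j
  induction j with
  | zero => intro _; simp [pvPref]
  | succ j ih =>
    intro hj
    have hcast : ((j + 1 : Nat) : Int) = (j : Int) + 1 := by push_cast; ring
    rw [hcast, PySem.List.pyRange_one_succ_right (by omega), List.foldl_append]
    rw [ih (by omega)]
    simp only [List.foldl_cons, List.foldl_nil]
    rw [PySem.List.pyGetD_eq_getElem l 0 (by omega) (by omega),
        pvPref_succ l j (by omega)]
    simp

lemma loopA (l : List Int) (m : Int) (h1 : -1 ≤ m) :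
    ∀ (k : Nat), (1 + (k : Int)) ≤ (l.length : Int) - m →
    (PySem.List.pyRange 1 (1 + (k : Int)) 1).foldl
      (fun (st : List (List Int) × Int) x =>
        let c := st.2 + PySem.List.pyGetD l (x + m) 0 - PySem.List.pyGetD l (x - 1) 0
        (st.1 ++ [[c, x]], c))
      ([[pvC l m 0, 0]], pvC l m 0)
    = ([[pvC l m 0, 0]] ++ (PySem.List.pyRange 1 (1 + (k : Int)) 1).map (pvG l m),
       pvC l m (k : Int)) := by
  intro k
  induction k with
  | zero => intro _; simp
  | succ k ih =>
    intro hk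
    have hcast : (1 + ((k + 1 : Nat) : Int)) = (1 + (k : Int)) + 1 := by push_cast; ring
    rw [hcast, PySem.List.pyRange_one_succ_right (by omega), List.foldl_append, List.map_append]
    rw [ih (by omega)]
    simp only [List.foldl_cons, List.foldl_nil, List.map_cons, List.map_nil]
    have hstep : pvC l m (k : Int) + PySem.List.pyGetD l ((1 + (k : Int)) + m) 0
        - PySem.List.pyGetD l ((1 + (k : Int)) - 1) 0 = pvC l m (1 + (k : Int)) := by
      have q1 := pvPref_succ' l (1 + (k : Int) + m) (by omega) (by omega)
      have q2 := pvPref_succ' l (1 + (k : Int) - 1) (by omega) (by omega)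
      unfold pvC
      rw [show ((1 : Int) + k + m).toNat = ((k : Int) + m + 1).toNat by omega,
          show ((1 : Int) + k + m + 1).toNat = (1 + (k : Int) + m + 1).toNat by omega] at q1
      rw [show ((1 : Int) + k - 1).toNat = ((k : Int)).toNat by omega,
          show ((1 : Int) + k - 1 + 1).toNat = ((1 : Int) + k).toNat by omega] at q2
      rw [show ((1 : Int) + k + m) = ((1 + (k : Int)) + m) by ring] at q1
      rw [show ((1 : Int) + k - 1) = ((1 + (k : Int)) - 1) by ring] at q2
      omega
    simp only [hstep]
    simp [pvG]
    congr 1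
    ring

lemma pfx_getD_int (l : List Int) (i : Int) (h0 : 0 ≤ i) (h : i ≤ (l.length : Int)) :
    PySem.List.pyGetD (l.foldl (fun acc d => acc ++ [PySem.List.pyGetD acc (-1) 0 + d]) [0]) i 0
      = pvPref l i.toNat := by
  rw [show i = ((i.toNat : Nat) : Int) by omega, PySem.List.pyGetD_natCast,
      pfx_getD l _ (by omega)]
  congr 1

-- ===== VERDICT (by name: the statement is the Claim_ definition above) =====
theorem solve_spec : Claim_equal_solve := by
  unfold Claim_equal_solve
  intro l m _hdom hpre
  obtain ⟨hm1, hmn⟩ := hpre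
  unfold Spec_solve solve solve_alt
  simp only []
  -- rewrite B into map (pvG l m) over the range
  have hB : (PySem.List.pyRange 0 ((l.length : Int) - m) 1).map
      (fun x => [PySem.List.pyGetD
          (l.foldl (fun acc d => acc ++ [PySem.List.pyGetD acc (-1) 0 + d]) [0]) (x + (m + 1)) 0
        - PySem.List.pyGetD
          (l.foldl (fun acc d => acc ++ [PySem.List.pyGetD acc (-1) 0 + d]) [0]) x 0, x])
      = (PySem.List.pyRange 0 ((l.length : Int) - m) 1).map (pvG l m) := by
    apply List.map_congr_left
    intro x hx
    rw [PySem.List.mem_pyRange_one] at hx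
    obtain ⟨hx0, hxn⟩ := hx
    rw [pfx_getD_int l (x + (m + 1)) (by omega) (by omega),
        pfx_getD_int l x (by omega) (by omega)]
    unfold pvG pvC
    rw [show x + (m + 1) = x + m + 1 by ring]
  rw [hB]
  -- A's first window sum
  have hc0 : (PySem.List.pyRange 0 (m + 1) 1).foldl
      (fun count x => count + PySem.List.pyGetD l x 0) 0 = pvC l m 0 := by
    have e : m + 1 = (((m + 1).toNat : Nat) : Int) := by omega
    rw [e, count0_spec l (m + 1).toNat (by omega)]
    unfold pvC pvPref
    simp
  rw [hc0]
  -- A's second loop via the invariant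
  have hk : (l.length : Int) - m = 1 + (((l.length : Int) - m - 1).toNat : Int) := by omega
  rw [hk, loopA l m hm1 _ (by omega)]
  rw [PySem.List.pyRange_one_cons (by omega : (0:Int) < 1 + (((l.length : Int) - m - 1).toNat : Int))]
  simp [pvG]
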